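-- pv_equiv track=rewrite | github.com/CodeOhms/egb220_robot_app | modules/coord_data.py | relative_to_absolute_coords
-- ===== SOURCE A (Python) =====
-- def relative_to_absolute_coords(rel_coords):
--     """
--     Pass in list of tuples containing relative x and y
--     coordinates, in that order, to produce a list of absolute x and y
--     coordinates.
--     """
--
--     abs_coords = []
--     sum_x = 0
--     sum_y = 0
--     for p in rel_coords:
--         abs_x = p[0] + sum_x
--         abs_y = p[1] + sum_y
--         abs_coords.append((abs_x , abs_y))
--         sum_x = abs_x
--         sum_y = abs_y
--
--     return abs_coords
-- ===== SOURCE B (Python) =====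
-- def _cumsum(seq):
--     out = []
--     total = 0
--     for v in seq:
--         total += v
--         out.append(total)
--     return out
--
--
-- def relative_to_absolute_coords(rel_coords):
--     """
--     Pass in list of tuples containing relative x and y
--     coordinates, in that order, to produce a list of absolute x and y
--     coordinates.
--     """
--     xs = _cumsum([p[0] for p in rel_coords])
--     ys = _cumsum([p[1] for p in rel_coords])
--     return list(zip(xs, ys))
-- ===== Notes on version B (the rewrite author's own statement) =====
-- stated objective: alternative
-- what changed: B splits the coordinates into the x and y channels, computes each axis's running cumulative sum independently with a scalar prefix-sum helper, and zips the two sums back into pairs, instead of A's single loop threading a (sum_x, sum_y) pair state.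
import Mathlib
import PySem

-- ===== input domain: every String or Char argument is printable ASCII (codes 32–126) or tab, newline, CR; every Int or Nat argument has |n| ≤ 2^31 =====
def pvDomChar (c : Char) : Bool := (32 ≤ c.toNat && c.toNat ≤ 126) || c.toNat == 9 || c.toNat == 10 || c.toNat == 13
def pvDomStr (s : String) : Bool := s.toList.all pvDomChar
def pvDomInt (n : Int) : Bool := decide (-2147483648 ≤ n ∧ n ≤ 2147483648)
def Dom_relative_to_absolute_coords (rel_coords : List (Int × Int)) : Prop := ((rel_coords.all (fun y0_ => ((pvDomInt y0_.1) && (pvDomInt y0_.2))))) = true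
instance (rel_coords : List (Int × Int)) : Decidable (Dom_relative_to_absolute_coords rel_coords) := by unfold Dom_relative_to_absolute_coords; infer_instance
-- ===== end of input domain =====

-- B splits the input into x and y channels, cumulative-sums each axis independently and zips the sums back into pairs (objective: alternative decomposition, same cost).


-- ===== PORT A =====
-- A: one loop over the pairs, threading state (abs_coords, sum_x, sum_y) and appending each new pair.
def relative_to_absolute_coords (rel_coords : List (Int × Int)) : List (Int × Int) :=
  (rel_coords.foldl
    (fun (st : List (Int × Int) × Int × Int) p =>
      let abs_x := p.1 + st.2.1
      let abs_y := p.2 + st.2.2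
      (st.1 ++ [(abs_x, abs_y)], abs_x, abs_y))
    ([], 0, 0)).1

-- ===== PORT B =====
-- B's scalar prefix-sum helper _cumsum: loop over one axis, threading (out, total).
def pvCumsum (seq : List Int) : List Int :=
  (seq.foldl
    (fun (st : List Int × Int) v =>
      let total := st.2 + v
      (st.1 ++ [total], total))
    ([], 0)).1

def relative_to_absolute_coords_alt (rel_coords : List (Int × Int)) : List (Int × Int) :=
  let xs := pvCumsum (rel_coords.map (fun p => p.1))
  let ys := pvCumsum (rel_coords.map (fun p => p.2))
  xs.zip ys

-- ===== PRECONDITION & SPEC =====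
def Spec_relative_to_absolute_coords (rel_coords : List (Int × Int)) (out : List (Int × Int)) : Prop := out = relative_to_absolute_coords_alt rel_coords
instance (rel_coords : List (Int × Int)) (out : List (Int × Int)) : Decidable (Spec_relative_to_absolute_coords rel_coords out) := by unfold Spec_relative_to_absolute_coords; infer_instance

-- ===== CLAIM (what is proved, stated in full; the proofs are below) =====
def Claim_equal_relative_to_absolute_coords : Prop := ∀ (rel_coords : List (Int × Int)), Dom_relative_to_absolute_coords rel_coords → Spec_relative_to_absolute_coords rel_coords (relative_to_absolute_coords rel_coords)

-- ===== LEMMAS AND PROOFS =====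

-- Reference recursion: the intended result starting from running sums (sx, sy).
def pvRef (rel : List (Int × Int)) (sx sy : Int) : List (Int × Int) :=
  match rel with
  | [] => []
  | (a, b) :: t => (sx + a, sy + b) :: pvRef t (sx + a) (sy + b)

theorem aLoop_eq_ref (rel : List (Int × Int)) (acc : List (Int × Int)) (sx sy : Int) :
    (rel.foldl
      (fun (st : List (Int × Int) × Int × Int) p =>
        let abs_x := p.1 + st.2.1
        let abs_y := p.2 + st.2.2
        (st.1 ++ [(abs_x, abs_y)], abs_x, abs_y))
      (acc, sx, sy)).1 = acc ++ pvRef rel sx sy := by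
  induction rel generalizing acc sx sy with
  | nil => simp [pvRef]
  | cons p t ih =>
    obtain ⟨a, b⟩ := p
    simp only [List.foldl, pvRef]
    rw [ih]
    simp [Int.add_comm]

theorem cumsum_loop (seq : List Int) (acc : List Int) (s : Int) :
    (seq.foldl
      (fun (st : List Int × Int) v =>
        let total := st.2 + v
        (st.1 ++ [total], total))
      (acc, s)).1 = acc ++ seq.foldr (fun v r => fun s => (s + v) :: r (s + v)) (fun _ => []) s := by
  induction seq generalizing acc s with
  | nil => simp
  | cons v t ih =>
    simp only [List.foldl, List.foldr]
    rw [ih]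
    simp

theorem bSide_eq_ref (rel : List (Int × Int)) (sx sy : Int) :
    ((rel.map (fun p => p.1)).foldr (fun v r => fun s => (s + v) :: r (s + v)) (fun _ => []) sx).zip
      ((rel.map (fun p => p.2)).foldr (fun v r => fun s => (s + v) :: r (s + v)) (fun _ => []) sy)
      = pvRef rel sx sy := by
  induction rel generalizing sx sy with
  | nil => simp [pvRef]
  | cons p t ih =>
    obtain ⟨a, b⟩ := p
    simp only [List.map, List.foldr, pvRef, List.zip]
    simpa using ih (sx + a) (sy + b)

-- ===== VERDICT (by name: the statement is the Claim_ definition above) =====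
theorem relative_to_absolute_coords_spec : Claim_equal_relative_to_absolute_coords := by
  intro rel _
  show relative_to_absolute_coords rel = relative_to_absolute_coords_alt rel
  unfold relative_to_absolute_coords relative_to_absolute_coords_alt pvCumsum
  rw [aLoop_eq_ref, cumsum_loop, cumsum_loop]
  simpa using (bSide_eq_ref rel 0 0).symm
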